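-- pv_equiv track=rewrite | github.com/acairncross/advent-of-code-2020 | day10/day10.py | count_diffs
-- ===== SOURCE A (Python) =====
-- def count_diffs(jolts):
--     diff1s = 0
--     diff3s = 0
--     for lo, hi in zip(jolts[:-1], jolts[1:]):
--         if hi - lo == 1:
--             diff1s += 1
--         elif hi - lo == 3:
--             diff3s += 1
--     return diff1s * diff3s
-- ===== SOURCE B (Python) =====
-- def count_diffs(jolts):
--     # Divide and conquer: counts of 1-diffs and 3-diffs over jolts[lo:hi]
--     # = counts in each half plus the single bridging pair (jolts[mid-1], jolts[mid]).
--     def go(lo, hi):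
--         if hi - lo < 2:
--             return 0, 0
--         mid = (lo + hi) // 2
--         a1, a3 = go(lo, mid)
--         b1, b3 = go(mid, hi)
--         d = jolts[mid] - jolts[mid - 1]
--         return a1 + b1 + (d == 1), a3 + b3 + (d == 3)
--     c1, c3 = go(0, len(jolts))
--     return c1 * c3
-- ===== Notes on version B (the rewrite author's own statement) =====
-- stated objective: alternative
-- what changed: B computes the two diff counts by divide and conquer on index ranges (recursively splitting [lo,hi) at the midpoint and adding the one bridging pair's contribution as boolean arithmetic), instead of A's single left-to-right zip scan with two if/elif counters.
import Mathlib
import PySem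

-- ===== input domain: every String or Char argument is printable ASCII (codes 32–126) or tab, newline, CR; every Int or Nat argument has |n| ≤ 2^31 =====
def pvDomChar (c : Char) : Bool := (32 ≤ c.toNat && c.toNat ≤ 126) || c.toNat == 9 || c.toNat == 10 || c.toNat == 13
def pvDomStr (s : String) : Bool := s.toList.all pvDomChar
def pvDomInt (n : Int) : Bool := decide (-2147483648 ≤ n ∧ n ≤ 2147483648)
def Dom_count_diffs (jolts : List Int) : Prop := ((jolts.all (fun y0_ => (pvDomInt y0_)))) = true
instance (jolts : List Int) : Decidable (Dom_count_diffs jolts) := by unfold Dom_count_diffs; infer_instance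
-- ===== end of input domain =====

-- B counts the 1- and 3-diffs by divide and conquer over index ranges (halves plus one
-- bridging pair) instead of A's left-to-right zip scan with two counters (alternative; same O(n)).

-- ===== PORT A =====
def count_diffs (jolts : List Int) : Int :=
  let s := ((PySem.List.slice jolts none (some (-1))).zip
            (PySem.List.slice jolts (some 1) none)).foldl
    (fun (s : Int × Int) p =>
      if p.2 - p.1 = 1 then (s.1 + 1, s.2)
      else if p.2 - p.1 = 3 then (s.1, s.2 + 1)
      else s) (0, 0)
  s.1 * s.2

-- ===== PORT B =====
-- jolts[mid] is ported as getD mid 0: every call from count_diffs_alt keeps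
-- 0 < mid < jolts.length, so the index is always in range (no IndexError in Python).
def goB (jolts : List Int) (lo hi : Nat) : Int × Int :=
  if hi - lo < 2 then (0, 0)
  else
    let mid := (lo + hi) / 2
    let a := goB jolts lo mid
    let b := goB jolts mid hi
    let d := jolts.getD mid 0 - jolts.getD (mid - 1) 0
    (a.1 + b.1 + (if d = 1 then 1 else 0), a.2 + b.2 + (if d = 3 then 1 else 0))
termination_by hi - lo
decreasing_by all_goals omega

def count_diffs_alt (jolts : List Int) : Int :=
  let c := goB jolts 0 jolts.length
  c.1 * c.2

-- ===== PRECONDITION & SPEC =====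
def Spec_count_diffs (jolts : List Int) (out : Int) : Prop := out = count_diffs_alt jolts
instance (jolts : List Int) (out : Int) : Decidable (Spec_count_diffs jolts out) := by unfold Spec_count_diffs; infer_instance

-- ===== CLAIM (what is proved, stated in full; the proofs are below) =====
def Claim_equal_count_diffs : Prop := ∀ (jolts : List Int), Dom_count_diffs jolts → Spec_count_diffs jolts (count_diffs jolts)

-- ===== LEMMAS AND PROOFS =====

-- the list of adjacent differences of jolts over the index interval [lo, hi)
def diffsIv (jolts : List Int) (lo hi : Nat) : List Int :=
  (List.range' (lo + 1) (hi - (lo + 1))).map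
    (fun i => jolts.getD i 0 - jolts.getD (i - 1) 0)

-- zip truncates, so pairing dropLast with the tail equals pairing the list with its tail
theorem dropLast_zip_tail (xs : List Int) : xs.dropLast.zip xs.tail = xs.zip xs.tail := by
  cases xs with
  | nil => rfl
  | cons x ys =>
    induction ys generalizing x with
    | nil => rfl
    | cons y ys ih =>
      show ((x :: y :: ys).dropLast).zip (y :: ys) = _
      have h := ih y
      simp only [List.dropLast_cons₂, List.zip_cons_cons, List.tail_cons] at *
      exact congrArg _ h

-- A's loop computes the counts of 1 and 3 in the list of adjacent differences
theorem foldA_eq (ps : List (Int × Int)) : ∀ (d1 d3 : Int),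
    ps.foldl (fun (s : Int × Int) p =>
      if p.2 - p.1 = 1 then (s.1 + 1, s.2)
      else if p.2 - p.1 = 3 then (s.1, s.2 + 1)
      else s) (d1, d3)
    = (d1 + ((ps.map (fun p => p.2 - p.1)).count 1 : Nat),
       d3 + ((ps.map (fun p => p.2 - p.1)).count 3 : Nat)) := by
  induction ps with
  | nil => intro d1 d3; simp
  | cons p ps ih =>
    intro d1 d3
    simp only [List.foldl_cons, List.map_cons]
    by_cases h1 : p.2 - p.1 = 1
    · simp [h1, ih]; ring
    · by_cases h3 : p.2 - p.1 = 3
      · simp [h3, ih]; ring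
      · simp [h1, h3, ih]

-- the zip-based difference list is the index-based difference list over [0, length)
theorem zip_tail_map_eq (xs : List Int) :
    (xs.zip xs.tail).map (fun p => p.2 - p.1) = diffsIv xs 0 xs.length := by
  unfold diffsIv
  induction xs with
  | nil => rfl
  | cons x ys ih =>
    cases ys with
    | nil => rfl
    | cons y zs =>
      simp only [List.zip_cons_cons, List.tail_cons, List.map_cons, List.length_cons,
        Nat.zero_add, Nat.add_sub_cancel] at ih ⊢
      rw [ih, List.range'_succ, List.map_cons]
      congr 1
      rw [List.range'_eq_map_range, List.range'_eq_map_range, List.map_map, List.map_map]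
      apply List.map_congr_left
      intro i _
      simp only [Function.comp_apply]
      rw [show 1 + 1 + i = (1 + i) + 1 by omega, List.getD_cons_succ,
          show (1 + i) + 1 - 1 = i + 1 by omega, List.getD_cons_succ,
          show 1 + i = i + 1 by omega, List.getD_cons_succ,
          Nat.add_sub_cancel]

-- splitting the difference interval at mid
theorem diffsIv_split (xs : List Int) (lo hi mid : Nat)
    (h2 : lo + 2 ≤ hi) (hm : mid = (lo + hi) / 2) :
    diffsIv xs lo hi
      = diffsIv xs lo mid
        ++ (xs.getD mid 0 - xs.getD (mid - 1) 0) :: diffsIv xs mid hi := by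
  have hlo : lo + 1 ≤ mid := by omega
  have hhi : mid + 1 ≤ hi := by omega
  unfold diffsIv
  have h1 : hi - (mid + 1) + 1 = hi - mid := by omega
  have hr : List.range' (lo + 1) (hi - (lo + 1))
      = List.range' (lo + 1) (mid - (lo + 1)) ++ mid :: List.range' (mid + 1) (hi - (mid + 1)) := by
    have := List.range'_append (s := lo + 1) (m := mid - (lo + 1)) (n := hi - mid) (step := 1)
    rw [show lo + 1 + 1 * (mid - (lo + 1)) = mid by omega] at this
    rw [show hi - (lo + 1) = (mid - (lo + 1)) + (hi - mid) by omega, ← this,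
        show hi - mid = (hi - (mid + 1)) + 1 by omega, List.range'_succ]
  rw [hr, List.map_append, List.map_cons]

-- B's recursion computes the counts of 1 and 3 over its interval
theorem goB_eq (xs : List Int) : ∀ (n lo hi : Nat), hi - lo ≤ n →
    goB xs lo hi
      = (((diffsIv xs lo hi).count 1 : Int), ((diffsIv xs lo hi).count 3 : Int)) := by
  intro n
  induction n with
  | zero =>
    intro lo hi h
    rw [goB, if_pos (by omega)]
    unfold diffsIv
    rw [show hi - (lo + 1) = 0 by omega]
    simp
  | succ n ih =>
    intro lo hi h
    rw [goB]
    by_cases hc : hi - lo < 2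
    · rw [if_pos hc]
      unfold diffsIv
      rw [show hi - (lo + 1) = 0 by omega]
      simp
    · rw [if_neg hc]
      have h2 : lo + 2 ≤ hi := by omega
      simp only []
      rw [ih lo ((lo + hi) / 2) (by omega), ih ((lo + hi) / 2) hi (by omega),
          diffsIv_split xs lo hi ((lo + hi) / 2) h2 rfl]
      simp only [List.count_append, List.count_cons, Prod.mk.injEq, beq_iff_eq]
      constructor <;> · split_ifs <;> push_cast <;> omega

-- ===== VERDICT (by name: the statement is the Claim_ definition above) =====
theorem count_diffs_spec : Claim_equal_count_diffs := by
  intro jolts _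
  show count_diffs jolts = count_diffs_alt jolts
  unfold count_diffs count_diffs_alt
  rw [PySem.List.slice_to_neg_one, PySem.List.slice_from_one, dropLast_zip_tail, foldA_eq,
      goB_eq jolts (jolts.length - 0) 0 jolts.length (by omega), zip_tail_map_eq]
  simp
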